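-- pv_equiv track=rewrite | github.com/GoogleCloudPlatform/gcsfuse-tools | gcsfuse-micro-benchmarking/helpers/helper.py | distribute_test_cases
-- ===== SOURCE A (Python) =====
-- def distribute_test_cases(total_tests, num_vms):
--     """
--     Distributes test cases across VMs as evenly as possible.
--
--     Args:
--         total_tests (int): Total number of test cases
--         num_vms (int): Number of VMs
--
--     Returns:
--         list: List of test-id ranges (e.g., ["1-5", "6-10", "11"])
--     """
--     if num_vms <= 0 or total_tests <= 0:
--         return []
--
--     tests_per_vm = total_tests // num_vms
--     remaining = total_tests % num_vms
--
--     ranges = []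
--     start_id = 1
--
--     for i in range(num_vms):
--         tests_for_vm = tests_per_vm + (1 if i < remaining else 0)
--         end_id = start_id + tests_for_vm - 1
--
--         if start_id == end_id:
--             ranges.append(str(start_id))
--         else:
--             ranges.append(f"{start_id}-{end_id}")
--
--         start_id = end_id + 1
--
--     return ranges
-- ===== SOURCE B (Python) =====
-- def distribute_test_cases(total_tests, num_vms):
--     """Distributes test cases across VMs as evenly as possible (closed-form per-VM ranges)."""
--     if num_vms <= 0 or total_tests <= 0:
--         return []
--     q, r = divmod(total_tests, num_vms)
--     out = []
--     for i in range(num_vms):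
--         start = i * q + min(i, r) + 1
--         end = (i + 1) * q + min(i + 1, r)
--         out.append(str(start) if start == end else f"{start}-{end}")
--     return out
-- ===== Notes on version B (the rewrite author's own statement) =====
-- stated objective: alternative
-- what changed: Replaced the carried start_id accumulator with a closed-form computation of each VM's start and end directly from the loop index (start = i*q + min(i,r) + 1, end = (i+1)*q + min(i+1,r)), so every range is computed independently of the previous iteration.
import Mathlib
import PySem

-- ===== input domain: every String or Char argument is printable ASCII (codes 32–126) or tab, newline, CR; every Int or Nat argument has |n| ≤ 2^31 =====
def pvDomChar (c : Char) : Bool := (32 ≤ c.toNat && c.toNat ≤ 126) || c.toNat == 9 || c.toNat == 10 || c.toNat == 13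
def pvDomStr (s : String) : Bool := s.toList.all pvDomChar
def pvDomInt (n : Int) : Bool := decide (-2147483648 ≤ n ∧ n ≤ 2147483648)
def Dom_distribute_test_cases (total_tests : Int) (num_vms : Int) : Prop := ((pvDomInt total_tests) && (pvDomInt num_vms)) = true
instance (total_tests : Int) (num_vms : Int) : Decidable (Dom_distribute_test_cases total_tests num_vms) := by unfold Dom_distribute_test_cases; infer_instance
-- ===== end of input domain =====

-- B replaces A's carried start_id accumulator by a closed-form start/end computed
-- directly from the loop index; same O(num_vms) cost (objective: alternative).

-- ===== PORT A =====
-- literal port of A: running start_id threaded through the loop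
def distribute_test_cases (total_tests : Int) (num_vms : Int) : List String :=
  if num_vms ≤ 0 ∨ total_tests ≤ 0 then []
  else
    let tests_per_vm := PySem.Int.floordiv total_tests num_vms
    let remaining := PySem.Int.mod total_tests num_vms
    let st := (PySem.List.pyRange 0 num_vms 1).foldl
      (fun (st : List String × Int) (i : Int) =>
        let start_id := st.2
        let tests_for_vm := tests_per_vm + (if i < remaining then 1 else 0)
        let end_id := start_id + tests_for_vm - 1
        let s := if start_id = end_id then PySem.Int.toStr start_id
                 else PySem.Int.toStr start_id ++ "-" ++ PySem.Int.toStr end_id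
        (st.1 ++ [s], end_id + 1))
      ([], 1)
    st.1

-- ===== PORT B =====
-- literal port of B: each range computed in closed form from i
def distribute_test_cases_alt (total_tests : Int) (num_vms : Int) : List String :=
  if num_vms ≤ 0 ∨ total_tests ≤ 0 then []
  else
    let q := PySem.Int.floordiv total_tests num_vms
    let r := PySem.Int.mod total_tests num_vms
    (PySem.List.pyRange 0 num_vms 1).map (fun i =>
      let start := i * q + min i r + 1
      let e := (i + 1) * q + min (i + 1) r
      if start = e then PySem.Int.toStr start
      else PySem.Int.toStr start ++ "-" ++ PySem.Int.toStr e)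

-- ===== PRECONDITION & SPEC =====
def Spec_distribute_test_cases (total_tests : Int) (num_vms : Int) (out : List String) : Prop := out = distribute_test_cases_alt total_tests num_vms
instance (total_tests : Int) (num_vms : Int) (out : List String) : Decidable (Spec_distribute_test_cases total_tests num_vms out) := by unfold Spec_distribute_test_cases; infer_instance

-- ===== CLAIM (what is proved, stated in full; the proofs are below) =====
def Claim_equal_distribute_test_cases : Prop := ∀ (total_tests : Int) (num_vms : Int), Dom_distribute_test_cases total_tests num_vms → Spec_distribute_test_cases total_tests num_vms (distribute_test_cases total_tests num_vms)

-- ===== LEMMAS AND PROOFS =====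

-- Loop invariant: after folding A's loop body over range(0, m), the accumulated list is
-- B's map over the same range and the carried start_id equals the closed form m*q + min m r + 1.
lemma pv_loop_eq (q r : Int) (hr : 0 ≤ r) (m : Nat) :
    (PySem.List.pyRange 0 (m : Int) 1).foldl
      (fun (st : List String × Int) (i : Int) =>
        let start_id := st.2
        let tests_for_vm := q + (if i < r then 1 else 0)
        let end_id := start_id + tests_for_vm - 1
        let s := if start_id = end_id then PySem.Int.toStr start_id
                 else PySem.Int.toStr start_id ++ "-" ++ PySem.Int.toStr end_id
        (st.1 ++ [s], end_id + 1))
      ([], 1)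
    = ((PySem.List.pyRange 0 (m : Int) 1).map (fun i =>
        let start := i * q + min i r + 1
        let e := (i + 1) * q + min (i + 1) r
        if start = e then PySem.Int.toStr start
        else PySem.Int.toStr start ++ "-" ++ PySem.Int.toStr e),
       (m : Int) * q + min (m : Int) r + 1) := by
  induction m with
  | zero => simp [PySem.List.pyRange_one_eq_nil, min_eq_left hr]
  | succ n ih =>
    have h2 : ((n : Int) : Int) ≤ (n : Int) + 1 := by omega
    have hsplit := PySem.List.pyRange_one_succ_right (a := 0) (b := (n : Int)) (Int.natCast_nonneg n)
    have hcast : ((n + 1 : Nat) : Int) = (n : Int) + 1 := by push_cast; ring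
    rw [hcast, hsplit, List.foldl_append, List.map_append, ih]
    simp only [List.foldl_cons, List.foldl_nil, List.map_cons, List.map_nil]
    have hend : (n : Int) * q + min (n : Int) r + 1 + (q + (if (n : Int) < r then 1 else 0)) - 1
        = ((n : Int) + 1) * q + min ((n : Int) + 1) r := by
      rcases lt_or_ge (n : Int) r with h | h
      · simp only [show min (n : Int) r = (n : Int) from min_eq_left h.le,
                   show min ((n : Int) + 1) r = (n : Int) + 1 from min_eq_left (by omega),
                   if_pos h]
        ring
      · simp only [show min (n : Int) r = r from min_eq_right h,
                   show min ((n : Int) + 1) r = r from min_eq_right (by omega),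
                   if_neg (not_lt.mpr h)]
        ring
    rw [hend]

-- ===== VERDICT (by name: the statement is the Claim_ definition above) =====
theorem distribute_test_cases_spec : Claim_equal_distribute_test_cases := by
  intro total_tests num_vms _
  unfold Spec_distribute_test_cases distribute_test_cases distribute_test_cases_alt
  by_cases h : num_vms ≤ 0 ∨ total_tests ≤ 0
  · simp [h]
  · simp only [h, if_false]
    have hn : 0 < num_vms := by omega
    obtain ⟨m, hm⟩ : ∃ m : Nat, num_vms = (m : Int) := ⟨num_vms.toNat, by omega⟩
    subst hm
    simpa using congrArg Prod.fst
      (pv_loop_eq (PySem.Int.floordiv total_tests (m : Int))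
        (PySem.Int.mod total_tests (m : Int)) (PySem.Int.mod_nonneg total_tests hn) m)
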